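-- pv_equiv track=rewrite | github.com/levgevorgyan-alt/calorie-bot | bot.py | _get_clarification_question
-- ===== SOURCE A (Python) =====
-- _CLARIFICATION_QUESTIONS = {
--     frozenset({"egg", "eggs"}): (
--         "How were the egg(s) cooked?\n"
--         "  e.g. *2 scrambled eggs* · *1 boiled egg* · *fried egg in butter*"
--     ),
--     frozenset({"chicken"}): (
--         "How was the chicken cooked, and roughly how much?\n"
--         "  e.g. *150g grilled chicken breast* · *fried chicken thigh*"
--     ),
--     frozenset({"beef", "steak", "meat"}): (
--         "How was it cooked, and how much?\n"
--         "  e.g. *200g grilled beef* · *beef stir-fry with oil*"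
--     ),
--     frozenset({"fish", "salmon", "tuna", "cod"}): (
--         "How was it cooked, and how much?\n"
--         "  e.g. *150g baked salmon* · *canned tuna 80g*"
--     ),
--     frozenset({"pork"}): (
--         "How was the pork cooked, and how much?\n"
--         "  e.g. *150g roasted pork* · *pork chop grilled*"
--     ),
--     frozenset({"rice"}): (
--         "How much rice?\n"
--         "  e.g. *1 cup cooked rice* · *200g white rice*"
--     ),
--     frozenset({"pasta", "noodles", "spaghetti"}): (
--         "How much, and with what sauce?\n"
--         "  e.g. *200g pasta with tomato sauce* · *100g spaghetti carbonara*"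
--     ),
--     frozenset({"bread", "toast"}): (
--         "How many slices, and with anything on it?\n"
--         "  e.g. *2 slices toast with butter* · *1 slice whole wheat bread*"
--     ),
--     frozenset({"coffee"}): (
--         "How do you take your coffee?\n"
--         "  e.g. *black coffee* · *flat white* · *coffee with milk and 2 sugars*"
--     ),
--     frozenset({"tea"}): (
--         "Black, or with milk/sugar?\n"
--         "  e.g. *black tea* · *tea with milk and 1 sugar*"
--     ),
--     frozenset({"salad"}): (
--         "What's in the salad, and any dressing?\n"
--         "  e.g. *green salad with olive oil* · *Caesar salad 250g*"
--     ),
--     frozenset({"oatmeal", "oats"}): (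
--         "How much, and with anything added?\n"
--         "  e.g. *50g oats with milk* · *oatmeal with banana and honey*"
--     ),
--     frozenset({"milk"}): (
--         "What kind, and how much?\n"
--         "  e.g. *200ml whole milk* · *skimmed milk 250ml*"
--     ),
--     frozenset({"juice"}): (
--         "What kind, and how much?\n"
--         "  e.g. *200ml orange juice* · *apple juice 250ml*"
--     ),
-- }
--
-- def _get_clarification_question(text: str) -> str:
--     """Return a specific clarification question based on the food mentioned."""
--     words = frozenset(text.strip().lower().split())
--     for food_set, question in _CLARIFICATION_QUESTIONS.items():
--         if words & food_set:
--             return f"\U0001f373 Got it! {question}"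
--     return (
--         "\U0001f37d Can you add a bit more detail?\n"
--         "Cooking method, quantity, or ingredients help a lot:\n"
--         "  e.g. *2 boiled eggs* \u00b7 *150g grilled chicken* \u00b7 *200g fried rice*"
--     )
-- ===== SOURCE B (Python) =====
-- _ENTRIES = [
--     (("egg", "eggs"),
--      "How were the egg(s) cooked?\n"
--      "  e.g. *2 scrambled eggs* · *1 boiled egg* · *fried egg in butter*"),
--     (("chicken",),
--      "How was the chicken cooked, and roughly how much?\n"
--      "  e.g. *150g grilled chicken breast* · *fried chicken thigh*"),
--     (("beef", "steak", "meat"),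
--      "How was it cooked, and how much?\n"
--      "  e.g. *200g grilled beef* · *beef stir-fry with oil*"),
--     (("fish", "salmon", "tuna", "cod"),
--      "How was it cooked, and how much?\n"
--      "  e.g. *150g baked salmon* · *canned tuna 80g*"),
--     (("pork",),
--      "How was the pork cooked, and how much?\n"
--      "  e.g. *150g roasted pork* · *pork chop grilled*"),
--     (("rice",),
--      "How much rice?\n"
--      "  e.g. *1 cup cooked rice* · *200g white rice*"),
--     (("pasta", "noodles", "spaghetti"),
--      "How much, and with what sauce?\n"
--      "  e.g. *200g pasta with tomato sauce* · *100g spaghetti carbonara*"),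
--     (("bread", "toast"),
--      "How many slices, and with anything on it?\n"
--      "  e.g. *2 slices toast with butter* · *1 slice whole wheat bread*"),
--     (("coffee",),
--      "How do you take your coffee?\n"
--      "  e.g. *black coffee* · *flat white* · *coffee with milk and 2 sugars*"),
--     (("tea",),
--      "Black, or with milk/sugar?\n"
--      "  e.g. *black tea* · *tea with milk and 1 sugar*"),
--     (("salad",),
--      "What's in the salad, and any dressing?\n"
--      "  e.g. *green salad with olive oil* · *Caesar salad 250g*"),
--     (("oatmeal", "oats"),
--      "How much, and with anything added?\n"
--      "  e.g. *50g oats with milk* · *oatmeal with banana and honey*"),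
--     (("milk",),
--      "What kind, and how much?\n"
--      "  e.g. *200ml whole milk* · *skimmed milk 250ml*"),
--     (("juice",),
--      "What kind, and how much?\n"
--      "  e.g. *200ml orange juice* · *apple juice 250ml*"),
-- ]
--
-- # reverse index: keyword -> (priority of its food set, question)
-- _WORD_TO_ENTRY = {
--     word: (priority, question)
--     for priority, (words, question) in enumerate(_ENTRIES)
--     for word in words
-- }
--
-- _DEFAULT = (
--     "\U0001f37d Can you add a bit more detail?\n"
--     "Cooking method, quantity, or ingredients help a lot:\n"
--     "  e.g. *2 boiled eggs* \u00b7 *150g grilled chicken* \u00b7 *200g fried rice*"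
-- )
--
--
-- def _get_clarification_question(text: str) -> str:
--     """Return a specific clarification question based on the food mentioned."""
--     best = None
--     for word in text.strip().lower().split():
--         entry = _WORD_TO_ENTRY.get(word)
--         if entry is not None and (best is None or entry[0] < best[0]):
--             best = entry
--     if best is None:
--         return _DEFAULT
--     return f"\U0001f373 Got it! {best[1]}"
-- ===== Notes on version B (the rewrite author's own statement) =====
-- stated objective: idiomatic
-- what changed: Replaces the scan over 14 food sets intersected with the word set by a precomputed flat keyword-to-(priority, question) index, a single pass over the words, and a minimum-priority selection.
import Mathlib
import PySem

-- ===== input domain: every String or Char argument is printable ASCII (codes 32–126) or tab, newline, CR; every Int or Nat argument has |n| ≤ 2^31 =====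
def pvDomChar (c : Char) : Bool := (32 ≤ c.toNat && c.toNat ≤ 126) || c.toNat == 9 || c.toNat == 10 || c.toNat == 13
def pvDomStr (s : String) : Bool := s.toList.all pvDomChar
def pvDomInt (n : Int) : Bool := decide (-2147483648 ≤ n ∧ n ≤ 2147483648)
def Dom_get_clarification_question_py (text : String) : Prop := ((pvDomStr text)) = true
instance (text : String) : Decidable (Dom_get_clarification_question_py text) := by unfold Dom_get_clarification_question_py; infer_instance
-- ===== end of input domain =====

-- B replaces the scan over 14 keyword sets by one precomputed keyword → (priority, question)
-- index, a single pass over the words, and a minimum-priority selection (objective: idiomatic).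

-- The 14 clarification questions (shared string constants of both ports, as in both Pythons).
def pvQ0 : String := "How were the egg(s) cooked?\n  e.g. *2 scrambled eggs* · *1 boiled egg* · *fried egg in butter*"
def pvQ1 : String := "How was the chicken cooked, and roughly how much?\n  e.g. *150g grilled chicken breast* · *fried chicken thigh*"
def pvQ2 : String := "How was it cooked, and how much?\n  e.g. *200g grilled beef* · *beef stir-fry with oil*"
def pvQ3 : String := "How was it cooked, and how much?\n  e.g. *150g baked salmon* · *canned tuna 80g*"
def pvQ4 : String := "How was the pork cooked, and how much?\n  e.g. *150g roasted pork* · *pork chop grilled*"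
def pvQ5 : String := "How much rice?\n  e.g. *1 cup cooked rice* · *200g white rice*"
def pvQ6 : String := "How much, and with what sauce?\n  e.g. *200g pasta with tomato sauce* · *100g spaghetti carbonara*"
def pvQ7 : String := "How many slices, and with anything on it?\n  e.g. *2 slices toast with butter* · *1 slice whole wheat bread*"
def pvQ8 : String := "How do you take your coffee?\n  e.g. *black coffee* · *flat white* · *coffee with milk and 2 sugars*"
def pvQ9 : String := "Black, or with milk/sugar?\n  e.g. *black tea* · *tea with milk and 1 sugar*"
def pvQ10 : String := "What's in the salad, and any dressing?\n  e.g. *green salad with olive oil* · *Caesar salad 250g*"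
def pvQ11 : String := "How much, and with anything added?\n  e.g. *50g oats with milk* · *oatmeal with banana and honey*"
def pvQ12 : String := "What kind, and how much?\n  e.g. *200ml whole milk* · *skimmed milk 250ml*"
def pvQ13 : String := "What kind, and how much?\n  e.g. *200ml orange juice* · *apple juice 250ml*"

def pvDefault : String := "🍽 Can you add a bit more detail?\nCooking method, quantity, or ingredients help a lot:\n  e.g. *2 boiled eggs* · *150g grilled chicken* · *200g fried rice*"

-- ===== PORT A =====
-- _CLARIFICATION_QUESTIONS: dict with frozenset keys, in insertion order.
def pvTableA : List (List String × String) :=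
  [(["egg", "eggs"], pvQ0), (["chicken"], pvQ1), (["beef", "steak", "meat"], pvQ2),
   (["fish", "salmon", "tuna", "cod"], pvQ3), (["pork"], pvQ4), (["rice"], pvQ5),
   (["pasta", "noodles", "spaghetti"], pvQ6), (["bread", "toast"], pvQ7),
   (["coffee"], pvQ8), (["tea"], pvQ9), (["salad"], pvQ10), (["oatmeal", "oats"], pvQ11),
   (["milk"], pvQ12), (["juice"], pvQ13)]

-- the 'for food_set, question in _CLARIFICATION_QUESTIONS.items()' loop;
-- 'if words & food_set:' is set-intersection truthiness, i.e. the intersection is nonempty.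
def pvALoop (words : PySem.Set String) : List (List String × String) → String
  | [] => pvDefault
  | (food_set, question) :: rest =>
      if PySem.Set.inter words food_set ≠ [] then "🍳 Got it! " ++ question
      else pvALoop words rest

def get_clarification_question_py (text : String) : String :=
  let words : PySem.Set String :=
    PySem.Set.ofList (PySem.Str.split₀ (PySem.Str.lower (PySem.Str.strip text)))
  pvALoop words pvTableA

-- ===== PORT B =====
-- _WORD_TO_ENTRY: flat reverse index keyword → (priority, question).
def pvIndex : PySem.Dict String (Nat × String) := PySem.Dict.ofList
  [("egg", (0, pvQ0)), ("eggs", (0, pvQ0)), ("chicken", (1, pvQ1)),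
   ("beef", (2, pvQ2)), ("steak", (2, pvQ2)), ("meat", (2, pvQ2)),
   ("fish", (3, pvQ3)), ("salmon", (3, pvQ3)), ("tuna", (3, pvQ3)), ("cod", (3, pvQ3)),
   ("pork", (4, pvQ4)), ("rice", (5, pvQ5)),
   ("pasta", (6, pvQ6)), ("noodles", (6, pvQ6)), ("spaghetti", (6, pvQ6)),
   ("bread", (7, pvQ7)), ("toast", (7, pvQ7)), ("coffee", (8, pvQ8)), ("tea", (9, pvQ9)),
   ("salad", (10, pvQ10)), ("oatmeal", (11, pvQ11)), ("oats", (11, pvQ11)),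
   ("milk", (12, pvQ12)), ("juice", (13, pvQ13))]

-- one step of B's loop body: keep the lowest-priority entry seen so far
def pvBStep (best : Option (Nat × String)) (word : String) : Option (Nat × String) :=
  match PySem.Dict.get? pvIndex word with
  | none => best
  | some entry =>
      match best with
      | none => some entry
      | some b => if entry.1 < b.1 then some entry else some b

def get_clarification_question_py_alt (text : String) : String :=
  let best := (PySem.Str.split₀ (PySem.Str.lower (PySem.Str.strip text))).foldl pvBStep none
  match best with
  | none => pvDefault
  | some b => "🍳 Got it! " ++ b.2

-- ===== PRECONDITION & SPEC =====
def Spec_get_clarification_question_py (text : String) (out : String) : Prop := out = get_clarification_question_py_alt text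
instance (text : String) (out : String) : Decidable (Spec_get_clarification_question_py text out) := by unfold Spec_get_clarification_question_py; infer_instance

-- ===== CLAIM (what is proved, stated in full; the proofs are below) =====
def Claim_equal_get_clarification_question_py : Prop := ∀ (text : String), Dom_get_clarification_question_py text → Spec_get_clarification_question_py text (get_clarification_question_py text)

-- ===== LEMMAS AND PROOFS =====

-- the keyword set and question of table row i (∅ / "" past the end)
def pvFS : Nat → List String
  | 0 => ["egg", "eggs"] | 1 => ["chicken"] | 2 => ["beef", "steak", "meat"]
  | 3 => ["fish", "salmon", "tuna", "cod"] | 4 => ["pork"] | 5 => ["rice"]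
  | 6 => ["pasta", "noodles", "spaghetti"] | 7 => ["bread", "toast"]
  | 8 => ["coffee"] | 9 => ["tea"] | 10 => ["salad"] | 11 => ["oatmeal", "oats"]
  | 12 => ["milk"] | 13 => ["juice"] | _ => []

def pvQn : Nat → String
  | 0 => pvQ0 | 1 => pvQ1 | 2 => pvQ2 | 3 => pvQ3 | 4 => pvQ4 | 5 => pvQ5 | 6 => pvQ6
  | 7 => pvQ7 | 8 => pvQ8 | 9 => pvQ9 | 10 => pvQ10 | 11 => pvQ11 | 12 => pvQ12
  | 13 => pvQ13 | _ => ""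

lemma pvTableA_length : pvTableA.length = 14 := rfl

lemma pvTableA_getElem (i : Nat) (h : i < 14) : pvTableA[i]'(by rw [pvTableA_length]; exact h) = (pvFS i, pvQn i) := by
  interval_cases i <;> rfl

-- index correctness, forward: every keyword of row i maps to (i, question i)
lemma pvIndex_complete (i : Nat) (hi : i < 14) (w : String) (hw : w ∈ pvFS i) :
    PySem.Dict.get? pvIndex w = some (i, pvQn i) := by
  interval_cases i <;> simp only [pvFS, List.mem_cons, List.not_mem_nil, or_false] at hw <;>
    rcases hw with rfl | rfl | rfl | rfl <;> rfl

-- the reverse index as a literal association list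
lemma pvIndex_items : pvIndex.items =
    [("egg", (0, pvQ0)), ("eggs", (0, pvQ0)), ("chicken", (1, pvQ1)),
     ("beef", (2, pvQ2)), ("steak", (2, pvQ2)), ("meat", (2, pvQ2)),
     ("fish", (3, pvQ3)), ("salmon", (3, pvQ3)), ("tuna", (3, pvQ3)), ("cod", (3, pvQ3)),
     ("pork", (4, pvQ4)), ("rice", (5, pvQ5)),
     ("pasta", (6, pvQ6)), ("noodles", (6, pvQ6)), ("spaghetti", (6, pvQ6)),
     ("bread", (7, pvQ7)), ("toast", (7, pvQ7)), ("coffee", (8, pvQ8)), ("tea", (9, pvQ9)),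
     ("salad", (10, pvQ10)), ("oatmeal", (11, pvQ11)), ("oats", (11, pvQ11)),
     ("milk", (12, pvQ12)), ("juice", (13, pvQ13))] := by rfl

-- index correctness, backward: every hit of the index is a keyword of its row
lemma pvIndex_sound (w : String) (e : Nat × String) (h : PySem.Dict.get? pvIndex w = some e) :
    e.1 < 14 ∧ w ∈ pvFS e.1 ∧ e.2 = pvQn e.1 := by
  simp only [PySem.Dict.get?, pvIndex_items, List.find?] at h
  repeat' split at h
  all_goals simp only [Option.map_some, Option.map_none, Option.some.injEq] at h
  all_goals first
  | (cases h; simp_all [pvFS, pvQn])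
  | simp at h

-- one step of B: the cases of pvBStep
lemma pvBStep_src (acc : Option (Nat × String)) (w : String) (e : Nat × String)
    (h : pvBStep acc w = some e) :
    acc = some e ∨ PySem.Dict.get? pvIndex w = some e := by
  cases hg : PySem.Dict.get? pvIndex w with
  | none =>
      simp only [pvBStep, hg] at h
      exact Or.inl h
  | some g =>
      cases acc with
      | none =>
          simp only [pvBStep, hg] at h
          exact Or.inr h
      | some b =>
          simp only [pvBStep, hg] at h
          split at h
          · exact Or.inr h
          · exact Or.inl h

-- one step of B on a nonempty accumulator stays nonempty and does not increase priority
lemma pvBStep_acc_le (b : Nat × String) (w : String) :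
    ∃ e, pvBStep (some b) w = some e ∧ e.1 ≤ b.1 := by
  cases hg : PySem.Dict.get? pvIndex w with
  | none => exact ⟨b, by simp [pvBStep, hg], le_refl _⟩
  | some g =>
      by_cases hlt : g.1 < b.1
      · exact ⟨g, by simp [pvBStep, hg, hlt], by omega⟩
      · exact ⟨b, by simp [pvBStep, hg, hlt], le_refl _⟩

-- one step of B on an index hit returns an entry at most as prioritised as the hit
lemma pvBStep_hit_le (acc : Option (Nat × String)) (w : String) (g : Nat × String)
    (hg : PySem.Dict.get? pvIndex w = some g) :
    ∃ e, pvBStep acc w = some e ∧ e.1 ≤ g.1 := by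
  cases acc with
  | none => exact ⟨g, by simp [pvBStep, hg], le_refl _⟩
  | some b =>
      by_cases hlt : g.1 < b.1
      · exact ⟨g, by simp [pvBStep, hg, hlt], le_refl _⟩
      · exact ⟨b, by simp [pvBStep, hg, hlt], by omega⟩

-- B's fold returns none only when nothing was found (and the accumulator was empty)
lemma pvFold_none (ws : List String) : ∀ acc, ws.foldl pvBStep acc = none →
    acc = none ∧ ∀ w ∈ ws, PySem.Dict.get? pvIndex w = none := by
  induction ws with
  | nil => intro acc h; simpa using h
  | cons w ws ih =>
      intro acc h
      rw [List.foldl_cons] at h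
      obtain ⟨hstep, hrest⟩ := ih _ h
      cases hg : PySem.Dict.get? pvIndex w with
      | some g =>
          obtain ⟨e, he, -⟩ := pvBStep_hit_le acc w g hg
          rw [he] at hstep
          exact absurd hstep (by simp)
      | none =>
          have hacc : pvBStep acc w = acc := by simp [pvBStep, hg]
          rw [hacc] at hstep
          exact ⟨hstep, fun x hx => by
            rcases List.mem_cons.mp hx with rfl | hx
            · exact hg
            · exact hrest x hx⟩

-- B's fold result comes from the accumulator or from a word of the list
lemma pvFold_src (ws : List String) : ∀ acc e, ws.foldl pvBStep acc = some e →
    acc = some e ∨ ∃ w ∈ ws, PySem.Dict.get? pvIndex w = some e := by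
  induction ws with
  | nil => intro acc e h; exact Or.inl (by simpa using h)
  | cons w ws ih =>
      intro acc e h
      rw [List.foldl_cons] at h
      rcases ih _ e h with hacc | ⟨x, hx, hgx⟩
      · rcases pvBStep_src acc w e hacc with h1 | h1
        · exact Or.inl h1
        · exact Or.inr ⟨w, by simp, h1⟩
      · exact Or.inr ⟨x, by simp [hx], hgx⟩

-- B's fold result has minimal priority among accumulator and all hits of the list
lemma pvFold_min (ws : List String) : ∀ acc e, ws.foldl pvBStep acc = some e →
    (∀ b, acc = some b → e.1 ≤ b.1) ∧
    (∀ w ∈ ws, ∀ g, PySem.Dict.get? pvIndex w = some g → e.1 ≤ g.1) := by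
  induction ws with
  | nil =>
      intro acc e h
      exact ⟨fun b hb => by simp_all, by simp⟩
  | cons w ws ih =>
      intro acc e h
      rw [List.foldl_cons] at h
      obtain ⟨hacc', hrest⟩ := ih _ e h
      refine ⟨fun b hb => ?_, fun x hx g hg => ?_⟩
      · subst hb
        obtain ⟨e', he', hle⟩ := pvBStep_acc_le b w
        exact le_trans (hacc' e' he') hle
      · rcases List.mem_cons.mp hx with rfl | hx
        · obtain ⟨e', he', hle⟩ := pvBStep_hit_le acc x g hg
          exact le_trans (hacc' e' he') hle
        · exact hrest x hx g hg

-- A's loop returns the default when no row intersects the word set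
lemma pvALoop_none (words : PySem.Set String) (l : List (List String × String))
    (h : ∀ p ∈ l, PySem.Set.inter words p.1 = []) : pvALoop words l = pvDefault := by
  induction l with
  | nil => rfl
  | cons p rest ih =>
      obtain ⟨fs, q⟩ := p
      simp only [pvALoop]
      rw [if_neg (by simpa using h (fs, q) (by simp)), ih (fun p hp => h p (by simp [hp]))]

-- A's loop returns row i when i is the first intersecting row
lemma pvALoop_min (words : PySem.Set String) :
    ∀ (l : List (List String × String)) (i : Nat) (hi : i < l.length),
    (∀ j (hj : j < i), PySem.Set.inter words (l[j]'(by omega)).1 = []) →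
    PySem.Set.inter words (l[i]'hi).1 ≠ [] →
    pvALoop words l = "🍳 Got it! " ++ (l[i]'hi).2 := by
  intro l
  induction l with
  | nil => intro i hi; simp at hi
  | cons p rest ih =>
      intro i hi hmin hhit
      obtain ⟨fs, q⟩ := p
      match i with
      | 0 => simpa [pvALoop] using fun h => absurd h (by simpa using hhit)
      | i + 1 =>
          have h0 : PySem.Set.inter words fs = [] := by simpa using hmin 0 (by omega)
          simp only [pvALoop, h0, ne_eq, not_true_eq_false, if_false]
          exact ih i (by simpa using hi) (fun j hj => by simpa using hmin (j + 1) (by omega))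
            (by simpa using hhit)

-- nonempty intersection ↔ a shared element
lemma pvInter_ne_nil (s fs : PySem.Set String) :
    PySem.Set.inter s fs ≠ [] ↔ ∃ w, w ∈ s ∧ w ∈ fs := by
  rw [ne_eq, List.eq_nil_iff_forall_not_mem]
  push Not
  simp only [PySem.Set.mem_inter]

-- the main equivalence, on the common word list
lemma pvMain (ws : List String) :
    pvALoop (PySem.Set.ofList ws) pvTableA =
      match ws.foldl pvBStep none with
      | none => pvDefault
      | some b => "🍳 Got it! " ++ b.2 := by
  cases hf : ws.foldl pvBStep none with
  | none =>
      obtain ⟨-, hall⟩ := pvFold_none ws none hf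
      refine pvALoop_none _ _ (fun p hp => ?_)
      obtain ⟨i, hi, rfl⟩ := List.mem_iff_getElem.mp hp
      have hi14 : i < 14 := by rw [pvTableA_length] at hi; exact hi
      rw [pvTableA_getElem i hi14]
      by_contra hne
      obtain ⟨w, hws, hwfs⟩ := (pvInter_ne_nil _ _).mp hne
      have := pvIndex_complete i hi14 w hwfs
      rw [hall w ((PySem.Set.mem_ofList ws w).mp hws)] at this
      simp at this
  | some e =>
      obtain hsrc | ⟨w, hw, hgw⟩ := pvFold_src ws none e hf
      · simp at hsrc
      obtain ⟨he14, hwfs, heq⟩ := pvIndex_sound w e hgw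
      obtain ⟨-, hmin⟩ := pvFold_min ws none e hf
      have hres := pvALoop_min (PySem.Set.ofList ws) pvTableA e.1 (by rw [pvTableA_length]; exact he14)
        (fun j hj => by
          rw [pvTableA_getElem j (by omega)]
          by_contra hne
          obtain ⟨x, hxs, hxfs⟩ := (pvInter_ne_nil _ _).mp hne
          have hgx := pvIndex_complete j (by omega) x hxfs
          have := hmin x ((PySem.Set.mem_ofList ws x).mp hxs) _ hgx
          omega)
        (by
          rw [pvTableA_getElem e.1 he14]
          exact (pvInter_ne_nil _ _).mpr ⟨w, (PySem.Set.mem_ofList ws w).mpr hw, hwfs⟩)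
      rw [hres, pvTableA_getElem e.1 he14, ← heq]

-- ===== VERDICT (by name: the statement is the Claim_ definition above) =====
set_option maxHeartbeats 1000000 in
theorem get_clarification_question_py_spec : Claim_equal_get_clarification_question_py := by
  intro text _
  unfold Spec_get_clarification_question_py get_clarification_question_py get_clarification_question_py_alt
  exact pvMain (PySem.Str.split₀ (PySem.Str.lower (PySem.Str.strip text)))
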